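-- pv_equiv track=rewrite | github.com/Lukzegl/Podstawy-sztucznej-inteligencji | main.py | parse_hands
-- ===== SOURCE A (Python) =====
-- def parse_hands(md_section):
--     """Parse the md| section and return the 4 hands."""
--     hand_strings = md_section.split(',')
--
--     hands = []
--     for hand_str in hand_strings:
--         if hand_str == "":
--             hands.append({})
--             continue
--
--         hand = parse_single_hand(hand_str)
--         hands.append(hand)
--
--     return hands
--
-- def parse_single_hand(hand_str):
--
--     if hand_str and hand_str[0].isdigit():
--         hand_str = hand_str[1:]
--
--     suits = {'S': 'Spades', 'H': 'Hearts', 'D': 'Diamonds', 'C': 'Clubs'}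
--     hand_dict = {suit: [] for suit in suits.values()}
--
--     current_suit = None
--     for char in hand_str:
--         if char in suits:
--             current_suit = suits[char]
--         elif current_suit:
--             hand_dict[current_suit].append(char)
--
--     return hand_dict
-- ===== SOURCE B (Python) =====
-- SUITS = {'S': 'Spades', 'H': 'Hearts', 'D': 'Diamonds', 'C': 'Clubs'}
--
--
-- def parse_hands(md_section):
--     """Parse the md| section and return the 4 hands."""
--     return [{} if h == "" else _parse_single_hand(h)
--             for h in md_section.split(',')]
--
--
-- def _parse_single_hand(hand_str):
--     s = hand_str[1:] if hand_str[0].isdigit() else hand_str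
--     hand = {name: [] for name in SUITS.values()}
--     n = len(s)
--     i = 0
--     # skip everything before the first suit marker
--     while i < n and s[i] not in SUITS:
--         i += 1
--     # consume the hand as (marker, run-of-cards) chunks
--     while i < n:
--         marker = s[i]
--         i += 1
--         run = []
--         while i < n and s[i] not in SUITS:
--             run.append(s[i])
--             i += 1
--         hand[SUITS[marker]].extend(run)
--     return hand
-- ===== Notes on version B (the rewrite author's own statement) =====
-- stated objective: alternative
-- what changed: A parses each hand with a per-character state machine that tracks the current suit and appends cards one at a time; B splits each hand into (suit-marker, run-of-cards) chunks and extends the suit's list once per chunk, and builds the hand list with a comprehension instead of an accumulator loop.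
import Mathlib
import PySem

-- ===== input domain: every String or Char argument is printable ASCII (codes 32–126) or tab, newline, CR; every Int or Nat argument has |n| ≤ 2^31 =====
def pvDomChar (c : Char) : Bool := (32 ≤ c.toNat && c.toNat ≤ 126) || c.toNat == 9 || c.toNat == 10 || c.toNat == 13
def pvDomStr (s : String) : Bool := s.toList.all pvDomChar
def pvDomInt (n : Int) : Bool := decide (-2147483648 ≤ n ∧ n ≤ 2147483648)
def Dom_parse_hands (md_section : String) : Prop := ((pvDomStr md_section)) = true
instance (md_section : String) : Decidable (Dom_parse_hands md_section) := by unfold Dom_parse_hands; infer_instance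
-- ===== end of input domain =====

-- B replaces A's per-character current-suit state machine by splitting each hand into
-- (suit-marker, run-of-cards) chunks and extending the suit's list once per chunk (objective: alternative).

-- ===== PORT A =====

-- suits = {'S': 'Spades', ...}
def pvSuitsA : PySem.Dict Char String :=
  PySem.Dict.ofList [('S', "Spades"), ('H', "Hearts"), ('D', "Diamonds"), ('C', "Clubs")]

-- hand_dict = {suit: [] for suit in suits.values()}
def pvHandInitA : PySem.Dict String (List String) :=
  (PySem.Dict.values pvSuitsA).foldl (fun d s => d.insert s ([] : List String)) PySem.Dict.empty

-- body of `for char in hand_str`; state = (current_suit, hand_dict).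
-- `hand_dict[current_suit].append(char)` is Dict.modify at current_suit — current_suit is always
-- one of the four suit names, a key always present, so Python's KeyError branch is unreachable.
def pvStepA (st : Option String × PySem.Dict String (List String)) (c : Char) :
    Option String × PySem.Dict String (List String) :=
  if pvSuitsA.contains c then (pvSuitsA.get? c, st.2)
  else match st.1 with           -- `elif current_suit:` — None is falsy, the suit names are nonempty
    | some s => (some s, st.2.modify s [] (· ++ [String.ofList [c]]))
    | none => st

def pvParseSingleHandA (cs : List Char) : PySem.Dict String (List String) :=
  -- if hand_str and hand_str[0].isdigit(): hand_str = hand_str[1:]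
  let cs' := match cs with
    | c :: rest => if PySem.Chars.isdigit c then rest else c :: rest
    | [] => []
  (cs'.foldl pvStepA (none, pvHandInitA)).2

def parse_hands (md_section : String) : List (List (String × List String)) :=
  let hand_strings := PySem.Chars.splitOn md_section.toList ",".toList
  hand_strings.foldl (fun hands h =>
    if h == ([] : List Char) then hands ++ [([] : List (String × List String))]
    else hands ++ [(pvParseSingleHandA h).items]) []

-- ===== PORT B =====

-- SUITS = {'S': 'Spades', ...}
def pvSuitsB : PySem.Dict Char String :=
  PySem.Dict.ofList [('S', "Spades"), ('H', "Hearts"), ('D', "Diamonds"), ('C', "Clubs")]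

-- `while i < n and s[i] not in SUITS: i += 1` — the cursor i is represented by the
-- remaining suffix s[i:], so advancing i is consuming the head
def pvSkipB (cs : List Char) : List Char :=
  match cs with
  | [] => []
  | c :: rest => if pvSuitsB.contains c then c :: rest else pvSkipB rest

-- inner `while i < n and s[i] not in SUITS` run loop: returns (run, suffix after the run)
def pvRunB (cs : List Char) : List Char × List Char :=
  match cs with
  | [] => ([], [])
  | c :: rest =>
    if pvSuitsB.contains c then ([], c :: rest)
    else
      let p := pvRunB rest
      (c :: p.1, p.2)

theorem pvRunB_snd_length (cs : List Char) : (pvRunB cs).2.length ≤ cs.length := by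
  induction cs with
  | nil => simp [pvRunB]
  | cons c rest ih =>
    simp only [pvRunB]
    split
    · simp
    · simpa using Nat.le_succ_of_le ih

-- outer `while i < n:` chunk loop; `hand[SUITS[marker]].extend(run)`.
-- pvChunksB is only reached with a suffix that is empty or starts with a suit marker,
-- so the `none` (KeyError) branch is unreachable; it is given the skipping behaviour.
def pvChunksB (d : PySem.Dict String (List String)) (cs : List Char) :
    PySem.Dict String (List String) :=
  match cs with
  | [] => d
  | c :: rest =>
    let p := pvRunB rest
    match pvSuitsB.get? c with
    | some s => pvChunksB (d.modify s [] (· ++ p.1.map (fun ch => String.ofList [ch]))) p.2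
    | none => pvChunksB d p.2
termination_by cs.length
decreasing_by
  · exact Nat.lt_succ_of_le (pvRunB_snd_length rest)
  · exact Nat.lt_succ_of_le (pvRunB_snd_length rest)

def pvParseSingleHandB (cs : List Char) : PySem.Dict String (List String) :=
  -- s = hand_str[1:] if hand_str[0].isdigit() else hand_str   (only called on nonempty hands)
  let cs' := match cs with
    | c :: rest => if PySem.Chars.isdigit c then rest else c :: rest
    | [] => []
  let hand := (PySem.Dict.values pvSuitsB).foldl
    (fun d s => d.insert s ([] : List String)) PySem.Dict.empty
  pvChunksB hand (pvSkipB cs')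

def parse_hands_alt (md_section : String) : List (List (String × List String)) :=
  (PySem.Chars.splitOn md_section.toList ",".toList).map
    (fun h => if h == ([] : List Char) then ([] : List (String × List String))
              else (pvParseSingleHandB h).items)

-- ===== PRECONDITION & SPEC =====
def Spec_parse_hands (md_section : String) (out : List (List (String × List String))) : Prop := out = parse_hands_alt md_section
instance (md_section : String) (out : List (List (String × List String))) : Decidable (Spec_parse_hands md_section out) := by unfold Spec_parse_hands; infer_instance

-- ===== CLAIM (what is proved, stated in full; the proofs are below) =====
def Claim_equal_parse_hands : Prop := ∀ (md_section : String), Dom_parse_hands md_section → Spec_parse_hands md_section (parse_hands md_section)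

-- ===== LEMMAS AND PROOFS =====

theorem pvSuitsB_eq : pvSuitsB = pvSuitsA := rfl

theorem pvSuitsA_get? (c : Char) :
    pvSuitsA.get? c =
      if 'S' = c then some "Spades"
      else if 'H' = c then some "Hearts"
      else if 'D' = c then some "Diamonds"
      else if 'C' = c then some "Clubs" else none := by
  have h : pvSuitsA = PySem.Dict.mk [('S', "Spades"), ('H', "Hearts"), ('D', "Diamonds"), ('C', "Clubs")] := by decide
  rw [h]
  have hz : (PySem.Dict.mk ([] : List (Char × String))).get? c = none := rfl
  simp [PySem.Dict.get?_mk_cons, hz]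

theorem pvSuitsA_get?_mem {c : Char} {s : String}
    (h : pvSuitsA.get? c = some s) : s ∈ ["Spades", "Hearts", "Diamonds", "Clubs"] := by
  rw [pvSuitsA_get?] at h
  split_ifs at h <;> simp_all

-- the (suit, char) assignments A's state machine performs, read off the raw characters
def pvAssign : Option String → List Char → List (String × Char)
  | _, [] => []
  | cur, c :: rest =>
    if pvSuitsA.contains c then pvAssign (pvSuitsA.get? c) rest
    else match cur with
      | some s => (s, c) :: pvAssign (some s) rest
      | none => pvAssign none rest

-- the cards a given suit k receives from a list of assignments
def pvTake (k : String) (l : List (String × Char)) : List String :=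
  (l.filter (fun p => p.1 == k)).map (fun p => String.ofList [p.2])

theorem pvTake_append (k : String) (l₁ l₂ : List (String × Char)) :
    pvTake k (l₁ ++ l₂) = pvTake k l₁ ++ pvTake k l₂ := by
  simp [pvTake, List.filter_append]

theorem foldA_getD (cs : List Char) (cur : Option String)
    (d : PySem.Dict String (List String)) (k : String) :
    ((cs.foldl pvStepA (cur, d)).2).getD k [] = d.getD k [] ++ pvTake k (pvAssign cur cs) := by
  induction cs generalizing cur d with
  | nil => simp [pvAssign, pvTake]
  | cons c rest ih =>
    simp only [List.foldl_cons, pvStepA, pvAssign]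
    by_cases hc : pvSuitsA.contains c = true
    · simp [hc, ih]
    · simp only [hc, if_neg, Bool.false_eq_true, not_false_eq_true]
      match cur with
      | none => simp [ih]
      | some s =>
        simp only [ih, PySem.Dict.getD_modify, pvTake, List.filter_cons]
        by_cases hk : k = s
        · subst hk; simp
        · rw [if_neg hk, if_neg (by simpa using Ne.symm hk)]

theorem foldA_keys (cs : List Char) (cur : Option String)
    (d : PySem.Dict String (List String))
    (hc : ∀ s, cur = some s → s ∈ d.keys)
    (hs : ∀ s, s ∈ ["Spades", "Hearts", "Diamonds", "Clubs"] → s ∈ d.keys) :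
    ((cs.foldl pvStepA (cur, d)).2).keys = d.keys := by
  induction cs generalizing cur d with
  | nil => rfl
  | cons c rest ih =>
    simp only [List.foldl_cons, pvStepA]
    by_cases hcc : pvSuitsA.contains c = true
    · simp only [hcc, if_true]
      exact ih _ _ (fun s h => hs s (pvSuitsA_get?_mem h)) hs
    · simp only [hcc, Bool.false_eq_true, if_false]
      match cur with
      | none => exact ih none d hc hs
      | some s =>
        have hmem : s ∈ d.keys := hc s rfl
        have hkeys : (d.modify s [] (· ++ [String.ofList [c]])).keys = d.keys := by
          rw [PySem.Dict.keys_modify,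
            PySem.Dict.keys_insert_of_contains _ _ ((PySem.Dict.contains_iff_mem_keys d s).mpr hmem)]
        exact (hkeys ▸ ih (some s) _ (fun t ht => by cases ht; rw [hkeys]; exact hmem)
          (fun t ht => by rw [hkeys]; exact hs t ht))

theorem pvAssign_none_run (cs : List Char) :
    pvAssign none (pvRunB cs).2 = pvAssign none cs := by
  induction cs with
  | nil => rfl
  | cons c rest ih =>
    simp only [pvRunB, pvSuitsB_eq]
    by_cases hc : pvSuitsA.contains c = true
    · simp [hc]
    · simp only [hc, Bool.false_eq_true, if_false]
      rw [ih]
      conv_rhs => rw [pvAssign]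
      simp [hc]

theorem pvAssign_run (cs : List Char) (s : String) :
    pvAssign (some s) cs =
      (pvRunB cs).1.map (fun c => (s, c)) ++ pvAssign none (pvRunB cs).2 := by
  induction cs generalizing s with
  | nil => rfl
  | cons c rest ih =>
    simp only [pvRunB, pvSuitsB_eq]
    by_cases hc : pvSuitsA.contains c = true
    · simp only [hc, if_true, List.map_nil, List.nil_append]
      conv_lhs => rw [pvAssign]
      conv_rhs => rw [pvAssign]
      simp [hc]
    · simp only [hc, Bool.false_eq_true, if_false, List.map_cons, List.cons_append]
      conv_lhs => rw [pvAssign]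
      simp [hc, ih]

theorem pvTake_run (k s : String) (run : List Char) :
    pvTake k (run.map (fun c => (s, c))) =
      if k = s then run.map (fun c => String.ofList [c]) else [] := by
  by_cases hk : k = s
  · subst hk
    simp [pvTake, List.filter_map, Function.comp_def, List.map_map]
  · simp [pvTake, List.filter_map, Function.comp_def, hk, Ne.symm hk]

theorem chunksB_getD (cs : List Char) (d : PySem.Dict String (List String)) (k : String) :
    (pvChunksB d cs).getD k [] = d.getD k [] ++ pvTake k (pvAssign none cs) := by
  induction d, cs using pvChunksB.induct with
  | case1 d => simp [pvChunksB, pvAssign, pvTake]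
  | case2 d c rest p s hs ih =>
    have hp : p = pvRunB rest := rfl
    have hcont : pvSuitsA.contains c = true := by
      rw [PySem.Dict.contains_eq_isSome_get?, ← pvSuitsB_eq, hs]; rfl
    rw [pvChunksB]
    simp only [hs]
    rw [ih]
    conv_rhs => rw [pvAssign]
    rw [if_pos hcont, show pvSuitsA.get? c = some s from pvSuitsB_eq ▸ hs,
      pvAssign_run rest s, pvTake_append, pvTake_run, PySem.Dict.getD_modify,
      pvAssign_none_run]
    by_cases hk : k = s
    · subst hk; simp [hp, List.append_assoc]
    · simp [hk]
  | case3 d c rest p hs ih =>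
    have hcont : pvSuitsA.contains c = false := by
      rw [PySem.Dict.contains_eq_isSome_get?, ← pvSuitsB_eq, hs]; rfl
    rw [pvChunksB]
    simp only [hs]
    rw [ih]
    conv_rhs => rw [pvAssign]
    rw [if_neg (by simp [hcont]), pvAssign_none_run]

theorem chunksB_keys (cs : List Char) (d : PySem.Dict String (List String))
    (hs : ∀ s, s ∈ ["Spades", "Hearts", "Diamonds", "Clubs"] → s ∈ d.keys) :
    (pvChunksB d cs).keys = d.keys := by
  induction d, cs using pvChunksB.induct with
  | case1 d => rw [pvChunksB]
  | case2 d c rest p s hsome ih =>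
    have hp : p = pvRunB rest := rfl
    rw [pvChunksB]
    simp only [hsome]
    have hmem : s ∈ d.keys := hs s (pvSuitsA_get?_mem (pvSuitsB_eq ▸ hsome))
    have hkeys : (d.modify s []
        (· ++ p.1.map (fun ch => String.ofList [ch]))).keys = d.keys := by
      rw [PySem.Dict.keys_modify,
        PySem.Dict.keys_insert_of_contains _ _ ((PySem.Dict.contains_iff_mem_keys d s).mpr hmem)]
    rw [ih (fun t ht => by rw [hkeys]; exact hs t ht), hkeys]
  | case3 d c rest p hsome ih =>
    rw [pvChunksB]
    simp only [hsome]
    exact ih hs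

theorem pvAssign_skip (cs : List Char) :
    pvAssign none (pvSkipB cs) = pvAssign none cs := by
  induction cs with
  | nil => rfl
  | cons c rest ih =>
    simp only [pvSkipB, pvSuitsB_eq]
    by_cases hc : pvSuitsA.contains c = true
    · simp [hc]
    · simp only [hc, Bool.false_eq_true, if_false]
      rw [ih]
      conv_rhs => rw [pvAssign]
      simp [hc]

theorem pvHandInit_keys : pvHandInitA.keys = ["Spades", "Hearts", "Diamonds", "Clubs"] := by decide

theorem single_hand_eq (cs : List Char) :
    (pvParseSingleHandA cs).items = (pvParseSingleHandB cs).items := by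
  unfold pvParseSingleHandA pvParseSingleHandB
  have hinit : (PySem.Dict.values pvSuitsB).foldl
      (fun d s => d.insert s ([] : List String)) PySem.Dict.empty = pvHandInitA := rfl
  rw [hinit]
  set cs' := (match cs with
    | c :: rest => if PySem.Chars.isdigit c then rest else c :: rest
    | [] => []) with hcs'
  have hmem : ∀ s, s ∈ ["Spades", "Hearts", "Diamonds", "Clubs"] → s ∈ pvHandInitA.keys := by
    intro s h; rw [pvHandInit_keys]; exact h
  have hkA : ((cs'.foldl pvStepA (none, pvHandInitA)).2).keys = pvHandInitA.keys :=
    foldA_keys cs' none pvHandInitA (fun s h => by cases h) hmem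
  have hkB : (pvChunksB pvHandInitA (pvSkipB cs')).keys = pvHandInitA.keys :=
    chunksB_keys _ _ hmem
  have hnodup : pvHandInitA.keys.Nodup := by decide
  rw [PySem.Dict.items_eq_map_keys _ (hkA ▸ hnodup) ([] : List String),
    PySem.Dict.items_eq_map_keys _ (hkB ▸ hnodup) ([] : List String), hkA, hkB]
  apply List.map_congr_left
  intro k _
  rw [foldA_getD, chunksB_getD, pvAssign_skip]

-- ===== VERDICT (by name: the statement is the Claim_ definition above) =====
theorem parse_hands_spec : Claim_equal_parse_hands := by
  intro md _
  unfold Spec_parse_hands parse_hands parse_hands_alt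
  have hbody : (fun (hands : List (List (String × List String))) (h : List Char) =>
      if h == ([] : List Char) then hands ++ [([] : List (String × List String))]
      else hands ++ [(pvParseSingleHandA h).items]) =
      fun hands h => hands ++ [if h == ([] : List Char) then []
        else (pvParseSingleHandA h).items] := by
    funext hands h; split <;> rfl
  rw [hbody, PySem.List.foldl_append_singleton_eq_map, List.nil_append]
  apply List.map_congr_left
  intro h _
  split <;> [rfl; exact single_hand_eq h]
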